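-- pv_equiv track=rewrite | github.com/madison-leask/promis | promis/workflow/scripts/.ipynb_checkpoints/analyze_MSI_lengths-checkpoint.py | find_repeat_run
-- ===== SOURCE A (Python) =====
-- def find_repeat_run(sequence, repeat_unit, min_repeats=3):
--     """
--     Locate the longest run of a repeat unit in a sequence.
--     Args:
--         sequence (str): The sequence to search.
--         repeat_unit (str): The repeat unit (e.g., "T", "CA").
--         min_repeats (int): Minimum number of repeats to consider a match.
--
--     Returns:
--         tuple: ((start, end), number_of_repeats).
--     """
--     unit_len = len(repeat_unit)
--     max_run_start = -1
--     max_run_end = -1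
--     max_run_repeats = 0
--
--     i = 0
--     while i <= len(sequence) - unit_len:
--         if sequence[i:i + unit_len] == repeat_unit:
--             run_start = i
--             run_repeats = 0
--
--             while i <= len(sequence) - unit_len and sequence[i:i + unit_len] == repeat_unit:
--                 run_repeats += 1
--                 i += unit_len
--
--             run_end = run_start + run_repeats * unit_len
--
--             if run_repeats >= min_repeats and run_repeats > max_run_repeats:
--                 max_run_start = run_start
--                 max_run_end = run_end
--                 max_run_repeats = run_repeats
--         else:
--             i += 1
--
--     return (max_run_start, max_run_end), max_run_repeats
-- ===== SOURCE B (Python) =====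
-- def find_repeat_run(sequence, repeat_unit, min_repeats=3):
--     """Locate the longest run of a repeat unit via a right-to-left DP table.
--
--     r[i] = number of consecutive copies of repeat_unit starting at i; then a
--     single arithmetic scan over r finds the maximal runs without re-slicing.
--     """
--     u = len(repeat_unit)
--     n = len(sequence)
--     r = [0] * (n + 1)
--     for i in range(n - u, -1, -1):
--         if sequence[i:i + u] == repeat_unit:
--             r[i] = 1 + r[i + u]
--     best = ((-1, -1), 0)
--     i = 0
--     while i <= n - u:
--         k = r[i]
--         if k > 0:
--             if k >= min_repeats and k > best[1]:
--                 best = ((i, i + k * u), k)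
--             i += k * u
--         else:
--             i += 1
--     return best
-- ===== Notes on version B (the rewrite author's own statement) =====
-- stated objective: alternative
-- what changed: Replaces A's nested while-loops (outer scan with an inner greedy re-slicing loop) by a right-to-left DP table r[i] = number of unit copies starting at i, followed by a single arithmetic jump-scan over the table.
import Mathlib
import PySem

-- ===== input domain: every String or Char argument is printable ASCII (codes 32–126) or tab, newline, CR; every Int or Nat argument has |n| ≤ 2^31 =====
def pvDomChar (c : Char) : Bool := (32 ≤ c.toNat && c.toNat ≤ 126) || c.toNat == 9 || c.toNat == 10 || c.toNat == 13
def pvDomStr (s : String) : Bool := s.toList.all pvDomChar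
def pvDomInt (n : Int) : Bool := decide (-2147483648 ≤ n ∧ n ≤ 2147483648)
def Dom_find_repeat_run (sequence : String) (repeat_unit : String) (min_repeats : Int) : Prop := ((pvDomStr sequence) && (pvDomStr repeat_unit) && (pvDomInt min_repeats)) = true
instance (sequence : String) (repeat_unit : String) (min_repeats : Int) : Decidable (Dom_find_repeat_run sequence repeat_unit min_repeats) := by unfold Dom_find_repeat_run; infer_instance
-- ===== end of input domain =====

-- B replaces A's nested greedy while-loops by a right-to-left DP table of run counts
-- plus a single arithmetic jump-scan (objective: alternative algorithm, same cost).


-- ===== PORT A =====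
-- inner while: greedily count copies of the unit from i; returns (run_repeats, new i)
def pvAInner (cs unit : List Char) (u : Int) : Nat → Int → Int × Int
  | 0, i => (0, i)
  | f + 1, i =>
    if i ≤ (cs.length : Int) - u ∧ PySem.List.slice cs (some i) (some (i + u)) = unit then
      let p := pvAInner cs unit u f (i + u)
      (p.1 + 1, p.2)
    else (0, i)

-- outer while of A (fuel only makes the loop total; it is never exhausted when u ≥ 1)
def pvAOuter (cs unit : List Char) (u minr : Int) : Nat → Int → (Int × Int) × Int → (Int × Int) × Int
  | 0, _, best => best
  | f + 1, i, best =>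
    if i ≤ (cs.length : Int) - u then
      if PySem.List.slice cs (some i) (some (i + u)) = unit then
        let p := pvAInner cs unit u (cs.length + 1) i
        let best' := if p.1 ≥ minr ∧ p.1 > best.2 then ((i, i + p.1 * u), p.1) else best
        pvAOuter cs unit u minr f p.2 best'
      else pvAOuter cs unit u minr f (i + 1) best
    else best

def find_repeat_run (sequence : String) (repeat_unit : String) (min_repeats : Int) : (Int × Int) × Int :=
  let cs := sequence.toList
  let us := repeat_unit.toList
  pvAOuter cs us (us.length : Int) min_repeats (cs.length + 1) 0 ((-1, -1), 0)

-- ===== PORT B =====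
-- backward loop of B: with k iterations remaining the current index is i = k - 1;
-- acc holds [r_k, …, r_n], so r[i+u] is acc[u-1]
def pvBBuild (cs unit : List Char) (u : Nat) : Nat → List Int → List Int
  | 0, acc => acc
  | k + 1, acc =>
    let v := if PySem.List.slice cs (some (k : Int)) (some ((k : Int) + (u : Int))) = unit
             then 1 + acc.getD (u - 1) 0 else 0
    pvBBuild cs unit u k (v :: acc)

-- B's jump-scan over the table
def pvBScan (table : List Int) (n u minr : Int) : Nat → Int → (Int × Int) × Int → (Int × Int) × Int
  | 0, _, best => best
  | f + 1, i, best =>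
    if i ≤ n - u then
      let k := table.getD i.toNat 0
      if k > 0 then
        let best' := if k ≥ minr ∧ k > best.2 then ((i, i + k * u), k) else best
        pvBScan table n u minr f (i + k * u) best'
      else pvBScan table n u minr f (i + 1) best
    else best

def find_repeat_run_alt (sequence : String) (repeat_unit : String) (min_repeats : Int) : (Int × Int) × Int :=
  let cs := sequence.toList
  let us := repeat_unit.toList
  let u := us.length
  let table := pvBBuild cs us u (cs.length + 1 - u) (List.replicate u 0)
  pvBScan table (cs.length : Int) (u : Int) min_repeats (cs.length + 1) 0 ((-1, -1), 0)

-- ===== PRECONDITION & SPEC =====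
-- Pre_ excludes only the empty repeat_unit, on which Python A's while loop never advances i and diverges.
def Pre_find_repeat_run (sequence : String) (repeat_unit : String) (min_repeats : Int) : Prop :=
  repeat_unit.toList ≠ []
instance (sequence : String) (repeat_unit : String) (min_repeats : Int) : Decidable (Pre_find_repeat_run sequence repeat_unit min_repeats) := by unfold Pre_find_repeat_run; infer_instance

def pvWitness_find_repeat_run : String × String × Int := ("AABAAA", "A", 2)

def Spec_find_repeat_run (sequence : String) (repeat_unit : String) (min_repeats : Int) (out : (Int × Int) × Int) : Prop := out = find_repeat_run_alt sequence repeat_unit min_repeats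
instance (sequence : String) (repeat_unit : String) (min_repeats : Int) (out : (Int × Int) × Int) : Decidable (Spec_find_repeat_run sequence repeat_unit min_repeats out) := by unfold Spec_find_repeat_run; infer_instance

-- ===== CLAIM (what is proved, stated in full; the proofs are below) =====
def Claim_equal_find_repeat_run : Prop := ∀ (sequence : String) (repeat_unit : String) (min_repeats : Int), Dom_find_repeat_run sequence repeat_unit min_repeats → Pre_find_repeat_run sequence repeat_unit min_repeats → Spec_find_repeat_run sequence repeat_unit min_repeats (find_repeat_run sequence repeat_unit min_repeats)

-- ===== LEMMAS AND PROOFS =====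

-- the "true" greedy run count starting at i (specification of both loops)
def pvG (cs unit : List Char) (u : Int) (hu : 1 ≤ u) (i : Int) : Int :=
  if h : i ≤ (cs.length : Int) - u ∧ PySem.List.slice cs (some i) (some (i + u)) = unit then
    1 + pvG cs unit u hu (i + u)
  else 0
termination_by ((cs.length : Int) - i).toNat
decreasing_by omega

theorem pvG_nonneg (cs unit : List Char) (u : Int) (hu : 1 ≤ u) (i : Int) :
    0 ≤ pvG cs unit u hu i := by
  fun_induction pvG <;> omega

theorem pvG_le (cs unit : List Char) (u : Int) (hu : 1 ≤ u) (i : Int) :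
    pvG cs unit u hu i ≤ (((cs.length : Int) - i).toNat : Int) := by
  fun_induction pvG with
  | case1 i h ih => omega
  | case2 i h => omega

theorem pvG_zero_of_gt (cs unit : List Char) (u : Int) (hu : 1 ≤ u) (i : Int)
    (h : (cs.length : Int) - u < i) : pvG cs unit u hu i = 0 := by
  rw [pvG, dif_neg]; omega

theorem pvAInner_eq (cs unit : List Char) (u : Int) (hu : 1 ≤ u) :
    ∀ (f : Nat) (i : Int), pvG cs unit u hu i < (f : Int) →
      pvAInner cs unit u f i = (pvG cs unit u hu i, i + pvG cs unit u hu i * u) := by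
  intro f
  induction f with
  | zero => intro i hf; have := pvG_nonneg cs unit u hu i; omega
  | succ f ih =>
    intro i hf
    rw [pvAInner]
    by_cases h : i ≤ (cs.length : Int) - u ∧ PySem.List.slice cs (some i) (some (i + u)) = unit
    · rw [if_pos h]
      have hg : pvG cs unit u hu i = 1 + pvG cs unit u hu (i + u) := by rw [pvG, dif_pos h]
      have hrec := ih (i + u) (by push_cast at hf ⊢; omega)
      simp only [hrec, hg, Prod.mk.injEq]
      exact ⟨by omega, by ring⟩
    · rw [if_neg h]
      have hg : pvG cs unit u hu i = 0 := by rw [pvG, dif_neg h]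
      simp [hg]

theorem pvBBuild_spec (cs unit : List Char) (u : Nat) (hu : 1 ≤ (u : Int)) :
    ∀ (k : Nat) (acc : List Int), k + u ≤ cs.length + 1 ∨ k = 0 →
      (∀ j : Nat, acc.getD j 0 = pvG cs unit (u : Int) hu ((k : Int) + (j : Int))) →
      ∀ j : Nat, (pvBBuild cs unit u k acc).getD j 0 = pvG cs unit (u : Int) hu (j : Int) := by
  intro k
  induction k with
  | zero =>
    intro acc _ hacc j
    rw [pvBBuild]
    simpa using hacc j
  | succ k ih =>
    intro acc hk hacc j
    have hk' : k + 1 + u ≤ cs.length + 1 := by omega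
    rw [pvBBuild]
    apply ih _ (by omega)
    intro j
    cases j with
    | zero =>
      have hcond : ((k : Int) ≤ (cs.length : Int) - (u : Int)) := by omega
      have hacc' := hacc (u - 1)
      have hcast : (((k + 1 : Nat) : Int) + ((u - 1 : Nat) : Int)) = (k : Int) + (u : Int) := by
        omega
      rw [hcast] at hacc'
      by_cases hs : PySem.List.slice cs (some (k : Int)) (some ((k : Int) + (u : Int))) = unit
      · have hg : pvG cs unit (u : Int) hu (k : Int) =
            1 + pvG cs unit (u : Int) hu ((k : Int) + (u : Int)) := by
          rw [pvG, dif_pos ⟨hcond, hs⟩]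
        simp only [List.getD] at hacc'
        simp [hs, hg, hacc']
      · have hg : pvG cs unit (u : Int) hu (k : Int) = 0 := by
          rw [pvG, dif_neg (by tauto)]
        simp [hs, hg]
    | succ j =>
      rw [List.getD_cons_succ, hacc j]
      congr 1
      omega

theorem pvScan_eq (cs unit : List Char) (u : Nat) (hu : 1 ≤ (u : Int)) (minr : Int)
    (table : List Int)
    (htab : ∀ j : Nat, table.getD j 0 = pvG cs unit (u : Int) hu (j : Int)) :
    ∀ (f : Nat) (i : Int), 0 ≤ i → ∀ best,
      pvAOuter cs unit (u : Int) minr f i best =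
      pvBScan table (cs.length : Int) (u : Int) minr f i best := by
  intro f
  induction f with
  | zero => intro i _ best; rfl
  | succ f ih =>
    intro i hi best
    rw [pvAOuter, pvBScan]
    by_cases hc : i ≤ (cs.length : Int) - (u : Int)
    · rw [if_pos hc, if_pos hc]
      have hk : table.getD i.toNat 0 = pvG cs unit (u : Int) hu i := by
        rw [htab i.toNat]
        congr 1
        omega
      by_cases hs : PySem.List.slice cs (some i) (some (i + (u : Int))) = unit
      · rw [if_pos hs]
        have hgpos : 0 < pvG cs unit (u : Int) hu i := by
          rw [pvG, dif_pos ⟨hc, hs⟩]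
          have := pvG_nonneg cs unit (u : Int) hu (i + u)
          omega
        have hgle := pvG_le cs unit (u : Int) hu i
        have hinner := pvAInner_eq cs unit (u : Int) hu (cs.length + 1) i (by push_cast; omega)
        rw [hinner]
        simp only [hk]
        rw [if_pos (by omega : 0 < pvG cs unit (u : Int) hu i)]
        apply ih
        have := pvG_nonneg cs unit (u : Int) hu i
        nlinarith
      · rw [if_neg hs]
        have hg : pvG cs unit (u : Int) hu i = 0 := by
          rw [pvG, dif_neg]; tauto
        simp only [hk, hg]
        rw [if_neg (by omega : ¬ ((0:Int) < 0))]
        exact ih (i + 1) (by omega) best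
    · rw [if_neg hc, if_neg hc]

-- ===== VERDICT (by name: the statement is the Claim_ definition above) =====
theorem find_repeat_run_spec : Claim_equal_find_repeat_run := by
  intro sequence repeat_unit min_repeats _ hpre
  unfold Spec_find_repeat_run find_repeat_run find_repeat_run_alt
  have hu : 1 ≤ (repeat_unit.toList.length : Int) := by
    cases h : repeat_unit.toList with
    | nil => exact absurd h hpre
    | cons a l => simp
  have hrep : ∀ (m j : Nat), (List.replicate m (0 : Int)).getD j 0 = 0 := by
    intro m j
    simp only [List.getD, List.getElem?_replicate]
    split <;> rfl
  have hinit : ∀ j : Nat,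
      (List.replicate repeat_unit.toList.length (0 : Int)).getD j 0 =
      pvG sequence.toList repeat_unit.toList (repeat_unit.toList.length : Int) hu
        (((sequence.toList.length + 1 - repeat_unit.toList.length : Nat) : Int) + (j : Int)) := by
    intro j
    rw [hrep, pvG_zero_of_gt _ _ _ _ _ (by omega)]
  have htab := pvBBuild_spec sequence.toList repeat_unit.toList repeat_unit.toList.length hu
      (sequence.toList.length + 1 - repeat_unit.toList.length)
      (List.replicate repeat_unit.toList.length 0) (by omega) hinit
  exact pvScan_eq sequence.toList repeat_unit.toList repeat_unit.toList.length hu min_repeats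
      _ htab (sequence.toList.length + 1) 0 le_rfl _
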